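-- pv_equiv track=rewrite | github.com/salmanmasroor/PythonQuest | 4-list.py | reorder_positives_negatives
-- ===== SOURCE A (Python) =====
-- def reorder_positives_negatives(list1: list):
--     list_max = []
--     for i in list1:
--         if i >= 0:
--             list_max.append(i)
--
--     list_min = []
--     for i in list1:
--         if i < 0 :
--             list_min.append(i)
--     return list_max + list_min
-- ===== SOURCE B (Python) =====
-- def reorder_positives_negatives(list1: list):
--     # One stable sort keyed on sign: False (non-negative) sorts before True.
--     return sorted(list1, key=lambda x: x < 0)
-- ===== Notes on version B (the rewrite author's own statement) =====
-- stated objective: idiomatic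
-- what changed: Replaced the two filtering passes and list concatenation with a single stable sort keyed on the sign predicate (x < 0), whose stability preserves the original order within each group.
import Mathlib
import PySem

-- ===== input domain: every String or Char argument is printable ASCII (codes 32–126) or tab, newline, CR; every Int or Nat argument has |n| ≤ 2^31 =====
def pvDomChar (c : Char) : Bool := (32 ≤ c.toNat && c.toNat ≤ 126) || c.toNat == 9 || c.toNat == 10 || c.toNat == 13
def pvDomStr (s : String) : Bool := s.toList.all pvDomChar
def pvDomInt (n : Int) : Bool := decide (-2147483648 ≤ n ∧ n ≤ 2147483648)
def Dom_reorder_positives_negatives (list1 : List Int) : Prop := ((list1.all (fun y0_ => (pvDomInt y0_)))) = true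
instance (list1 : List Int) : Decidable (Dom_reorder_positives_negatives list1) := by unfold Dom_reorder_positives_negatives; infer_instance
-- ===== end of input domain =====

-- B replaces A's two filtering passes with a single stable sort keyed on the sign predicate (idiomatic; not faster).


-- ===== PORT A =====
-- two passes over list1: collect the non-negatives, then the negatives, return their concatenation
def reorder_positives_negatives (list1 : List Int) : List Int :=
  let list_max := list1.foldl (fun acc i => if i ≥ 0 then acc ++ [i] else acc) []
  let list_min := list1.foldl (fun acc i => if i < 0 then acc ++ [i] else acc) []
  list_max ++ list_min

-- ===== PORT B =====
-- sorted(list1, key=lambda x: x < 0): stable sort on a Bool key (false < true, as in Python)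
def reorder_positives_negatives_alt (list1 : List Int) : List Int :=
  PySem.List.sorted list1 (fun x => decide (x < 0))

-- ===== PRECONDITION & SPEC =====
def Spec_reorder_positives_negatives (list1 : List Int) (out : List Int) : Prop := out = reorder_positives_negatives_alt list1
instance (list1 : List Int) (out : List Int) : Decidable (Spec_reorder_positives_negatives list1 out) := by unfold Spec_reorder_positives_negatives; infer_instance

-- ===== CLAIM (what is proved, stated in full; the proofs are below) =====
def Claim_equal_reorder_positives_negatives : Prop := ∀ (list1 : List Int), Dom_reorder_positives_negatives list1 → Spec_reorder_positives_negatives list1 (reorder_positives_negatives list1)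

-- ===== LEMMAS AND PROOFS =====

-- insertBy passes over a prefix it does not insert before, and inserts before the rest
theorem insertBy_middle {α : Type} (bef : α → α → Bool) (x : α) (P N : List α)
    (hP : ∀ p ∈ P, bef x p = false) (hN : ∀ n ∈ N, bef x n = true) :
    PySem.List.insertBy bef x (P ++ N) = P ++ x :: N := by
  induction P with
  | nil =>
    cases N with
    | nil => simp [PySem.List.insertBy]
    | cons n N => simp [PySem.List.insertBy, hN n (by simp)]
  | cons p P ih =>
    have hp : bef x p = false := hP p (by simp)
    simp only [List.cons_append, PySem.List.insertBy, hp]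
    simp [ih (fun q hq => hP q (by simp [hq]))]

-- loop invariant for insertion sort with the Bool sign key
theorem sortSign_aux (xs P N : List Int)
    (hP : ∀ p ∈ P, 0 ≤ p) (hN : ∀ n ∈ N, n < 0) :
    xs.foldl (fun acc x => PySem.List.insertBy
        (fun a b => decide ((decide (a < 0) : Bool) < (decide (b < 0) : Bool))) x acc) (P ++ N)
      = (P ++ xs.filter (fun x => decide (0 ≤ x))) ++ (N ++ xs.filter (fun x => decide (x < 0))) := by
  induction xs generalizing P N with
  | nil => simp
  | cons x xs ih =>
    by_cases hx : x < 0
    · have hstep : PySem.List.insertBy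
          (fun a b => decide ((decide (a < 0) : Bool) < (decide (b < 0) : Bool))) x (P ++ N)
          = (P ++ N) ++ [x] := by
        apply PySem.List.insertBy_of_forall_not_before
        intro y hy
        simp [hx, Bool.lt_iff]
      have := ih P (N ++ [x]) hP (by intro n hn; rcases List.mem_append.mp hn with h | h
                                     · exact hN n h
                                     · simp at h; omega)
      simp only [List.foldl_cons, hstep, List.append_assoc] at this ⊢
      rw [this]
      simp [hx, not_le.mpr hx]
    · rw [not_lt] at hx
      have hstep : PySem.List.insertBy
          (fun a b => decide ((decide (a < 0) : Bool) < (decide (b < 0) : Bool))) x (P ++ N)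
          = P ++ x :: N := by
        apply insertBy_middle
        · intro p hp
          simp [not_lt.mpr hx, not_lt.mpr (hP p hp)]
        · intro n hn
          simp [not_lt.mpr hx, hN n hn, Bool.lt_iff]
      have := ih (P ++ [x]) N
        (by intro p hp; rcases List.mem_append.mp hp with h | h
            · exact hP p h
            · simp at h; omega) hN
      simp only [List.foldl_cons, hstep, List.append_assoc, List.singleton_append] at this ⊢
      rw [this]
      simp [hx, not_lt.mpr hx]

-- ===== VERDICT (by name: the statement is the Claim_ definition above) =====
theorem reorder_positives_negatives_spec : Claim_equal_reorder_positives_negatives := by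
  intro list1 _
  unfold Spec_reorder_positives_negatives reorder_positives_negatives reorder_positives_negatives_alt
  rw [PySem.List.sorted_eq_foldl_insertBy]
  have h := sortSign_aux list1 [] [] (by simp) (by simp)
  simp only [List.nil_append] at h
  rw [h]
  have e1 : (fun (acc : List Int) (i : Int) => if i ≥ 0 then acc ++ [i] else acc)
      = (fun acc i => if (fun x : Int => decide (0 ≤ x)) i = true then acc ++ [id i] else acc) := by
    funext acc i; simp [ge_iff_le]
  have e2 : (fun (acc : List Int) (i : Int) => if i < 0 then acc ++ [i] else acc)
      = (fun acc i => if (fun x : Int => decide (x < 0)) i = true then acc ++ [id i] else acc) := by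
    funext acc i; simp
  show List.foldl (fun acc i => if i ≥ 0 then acc ++ [i] else acc) [] list1
      ++ List.foldl (fun acc i => if i < 0 then acc ++ [i] else acc) [] list1 = _
  rw [e1, e2, PySem.List.foldl_append_if, PySem.List.foldl_append_if]
  simp
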